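-- pv_equiv track=rewrite | github.com/Matsumoto213/atcoder | re_abc199_C.py | calc
-- ===== SOURCE A (Python) =====
-- def calc(n):
--     n = list(str(n))
--     n = [int(n[i]) for i in range(len(n))]
--     n.sort()
--     n = [str(i) for i in n]
--     mi_ = "".join(n)
--     ma_ = "".join(n[::-1])
--     return int(ma_) - int(mi_)
-- ===== SOURCE B (Python) =====
-- def calc(n):
--     cnt = [0] * 10
--     for c in str(n):
--         cnt[int(c)] += 1
--     asc = "".join(str(d) * cnt[d] for d in range(10))
--     return int(asc[::-1]) - int(asc)
-- ===== Notes on version B (the rewrite author's own statement) =====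
-- stated objective: alternative
-- what changed: B counting-sorts the digits of str(n) into a length-10 frequency table and joins each digit repeated its count in ascending order (reversing that string for the maximum), instead of A's comparison sort of the digit list plus a reversed-list join; Pre_ excludes negative n, on which both A and B raise ValueError from int('-').
import Mathlib
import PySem

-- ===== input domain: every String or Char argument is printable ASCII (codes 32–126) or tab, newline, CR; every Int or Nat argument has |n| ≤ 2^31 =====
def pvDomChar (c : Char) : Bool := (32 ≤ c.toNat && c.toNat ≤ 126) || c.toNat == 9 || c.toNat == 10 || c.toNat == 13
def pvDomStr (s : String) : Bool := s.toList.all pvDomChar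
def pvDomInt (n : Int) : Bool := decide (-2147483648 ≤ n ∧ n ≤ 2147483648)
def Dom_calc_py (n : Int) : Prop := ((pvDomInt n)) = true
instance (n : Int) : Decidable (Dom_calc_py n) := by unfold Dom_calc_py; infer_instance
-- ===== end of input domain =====

-- B replaces A's comparison sort of the digit list by a counting sort (a digit-frequency table
-- emitted once in ascending order) and takes the reversed string for the maximum; objective:
-- alternative (a genuinely different algorithm of similar cost at these input sizes).

-- ===== PORT A =====
-- calc(n):
--   n = list(str(n)); n = [int(n[i]) for i in range(len(n))]; n.sort()
--   n = [str(i) for i in n]; mi_ = "".join(n); ma_ = "".join(n[::-1]); return int(ma_) - int(mi_)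
def calc_py (n : Int) : Int :=
  let s : List Char := PySem.Int.toChars n
  -- [int(n[i]) for i in range(len(n))]; int of a one-char string raises ValueError = none
  match (PySem.List.pyRange 0 (s.length : Int)).mapM
      (fun i => (PySem.List.pyGet? s i).bind (fun c => PySem.Int.ofChars? [c])) with
  | none => 0      -- ValueError: outside Pre_
  | some ds =>
    let sds := PySem.List.sorted ds (fun x => x)          -- n.sort()
    let strs := sds.map PySem.Int.toChars                 -- [str(i) for i in n]
    let mi := PySem.Chars.join [] strs                    -- "".join(n)
    match PySem.List.slice? strs none none (-1) with      -- n[::-1]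
    | none => 0    -- unreachable (step is -1, never 0)
    | some rstrs =>
      let ma := PySem.Chars.join [] rstrs                 -- "".join(n[::-1])
      (PySem.Int.ofChars? ma).getD 0 - (PySem.Int.ofChars? mi).getD 0  -- int(ma_) - int(mi_) (never none here)

-- ===== PORT B =====
-- cnt[int(c)] += 1 : whenever int(c) on a single character succeeds it is a digit 0–9,
-- so the list index is always in range; the read is pyGetD, the write List.set.
def pvBump (cnt : List Int) (d : Int) : List Int :=
  cnt.set d.toNat (PySem.List.pyGetD cnt d 0 + 1)

-- calc(n):
--   cnt = [0]*10
--   for c in str(n): cnt[int(c)] += 1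
--   asc = "".join(str(d) * cnt[d] for d in range(10))
--   return int(asc[::-1]) - int(asc)
def calc_py_alt (n : Int) : Int :=
  match (PySem.Int.toChars n).foldlM
      (fun (cnt : List Int) c => (PySem.Int.ofChars? [c]).map (pvBump cnt))
      (PySem.List.pyRepeat [(0 : Int)] 10) with
  | none => 0      -- ValueError from int(c): outside Pre_
  | some cnt =>
    let asc := PySem.Chars.join []
      ((PySem.List.pyRange 0 10).map
        (fun d => PySem.List.pyRepeat (PySem.Int.toChars d) (PySem.List.pyGetD cnt d 0)))
    match PySem.List.slice? asc none none (-1) with       -- asc[::-1]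
    | none => 0    -- unreachable (step is -1, never 0)
    | some rev =>
      (PySem.Int.ofChars? rev).getD 0 - (PySem.Int.ofChars? asc).getD 0  -- never none here

-- ===== PRECONDITION & SPEC =====
-- Pre_ excludes negative n, on which A raises ValueError (int('-') fails; B raises it too).
def Pre_calc_py (n : Int) : Prop := 0 ≤ n
instance (n : Int) : Decidable (Pre_calc_py n) := by unfold Pre_calc_py; infer_instance
def pvWitness_calc_py : Int := 210

def Spec_calc_py (n : Int) (out : Int) : Prop := out = calc_py_alt n
instance (n : Int) (out : Int) : Decidable (Spec_calc_py n out) := by unfold Spec_calc_py; infer_instance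

-- ===== CLAIM =====
def Claim_equal_calc_py : Prop := ∀ (n : Int), Dom_calc_py n → Pre_calc_py n → Spec_calc_py n (calc_py n)

-- ===== LEMMAS AND PROOFS =====

-- a digit character: code point between '0' (48) and '9' (57)
def pvIsDig (c : Char) : Prop := 48 ≤ c.toNat ∧ c.toNat ≤ 57

lemma pv_join_nil_flatten (L : List (List Char)) : PySem.Chars.join [] L = L.flatten := by
  simp only [PySem.Chars.join, List.intercalate]
  induction L with
  | nil => rfl
  | cons a t ih => cases t <;> simp_all [List.intersperse]

lemma pv_toDigitsCore_digits (f : Nat) : ∀ (m : Nat) (acc : List Char),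
    (∀ c ∈ acc, pvIsDig c) → ∀ c ∈ Nat.toDigitsCore 10 f m acc, pvIsDig c := by
  induction f with
  | zero => intro m acc hacc; simpa [Nat.toDigitsCore] using hacc
  | succ f ih =>
    intro m acc hacc c hc
    have hdc : pvIsDig (Nat.digitChar (m % 10)) := by
      have : m % 10 < 10 := Nat.mod_lt _ (by omega)
      interval_cases h : m % 10 <;> exact ⟨by decide, by decide⟩
    simp only [Nat.toDigitsCore] at hc
    by_cases h10 : m / 10 = 0
    · simp [h10] at hc
      rcases hc with hc | hc
      · exact hc ▸ hdc
      · exact hacc c hc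
    · simp [h10] at hc
      exact ih (m / 10) _ (by intro x hx; rcases List.mem_cons.mp hx with h | h; exacts [h ▸ hdc, hacc x h]) c hc

lemma pv_toChars_digits (n : Int) (hn : 0 ≤ n) : ∀ c ∈ PySem.Int.toChars n, pvIsDig c := by
  have : ¬ n < 0 := by omega
  simp only [PySem.Int.toChars, this, if_false]
  exact pv_toDigitsCore_digits _ _ _ (by simp)

lemma pv_ofChars_digit (c : Char) (h1 : 48 ≤ c.toNat) (h2 : c.toNat ≤ 57) :
    PySem.Int.ofChars? [c] = some ((c.toNat : Int) - 48) := by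
  have hc : c = Char.ofNat c.toNat := (Char.ofNat_toNat c).symm
  interval_cases h : c.toNat <;> rw [hc] <;> decide

lemma pv_mapM_bounds : ∀ (s : List Char) (ds : List Int),
    (∀ c ∈ s, pvIsDig c) →
    s.mapM (fun c => PySem.Int.ofChars? [c]) = some ds →
    ∀ d ∈ ds, 0 ≤ d ∧ d < 10 := by
  intro s
  induction s with
  | nil => intro ds _ h; simp only [List.mapM_nil, Option.pure_def, Option.some.injEq] at h; simp [← h]
  | cons a t ih =>
    intro ds hs h
    rw [List.mapM_cons] at h
    have ha : pvIsDig a := hs a (by simp)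
    rw [pv_ofChars_digit a ha.1 ha.2] at h
    cases ht : t.mapM (fun c => PySem.Int.ofChars? [c]) with
    | none => rw [ht] at h; simp at h
    | some ds' =>
      simp [ht] at h
      intro d hd
      rw [← h] at hd
      rcases List.mem_cons.mp hd with rfl | hd'
      · have := ha; unfold pvIsDig at this; omega
      · exact ih ds' (fun c hc => hs c (by simp [hc])) ht d hd'

lemma pv_mapM_range (s : List Char) :
    (PySem.List.pyRange 0 (s.length : Int)).mapM
      (fun i => (PySem.List.pyGet? s i).bind (fun c => PySem.Int.ofChars? [c]))
    = s.mapM (fun c => PySem.Int.ofChars? [c]) := by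
  rw [PySem.List.pyRange_zero_natCast]
  induction s with
  | nil => simp
  | cons a t ih =>
    rw [List.length_cons, List.range_succ_eq_map, List.map_cons, List.mapM_cons]
    rw [PySem.List.pyGet?_natCast]
    simp only [List.getElem?_cons_zero]
    have hrest : (List.map (fun k => ((k : Nat) : Int)) (List.map Nat.succ (List.range t.length))).mapM
        (fun i => (PySem.List.pyGet? (a :: t) i).bind (fun c => PySem.Int.ofChars? [c]))
      = (List.map (fun k => ((k : Nat) : Int)) (List.range t.length)).mapM
        (fun i => (PySem.List.pyGet? t i).bind (fun c => PySem.Int.ofChars? [c])) := by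
      rw [List.map_map, ← List.mapM'_eq_mapM, ← List.mapM'_eq_mapM]
      induction (List.range t.length) with
      | nil => rfl
      | cons j r ihr =>
        simp only [List.map_cons, List.mapM'_cons, Function.comp]
        rw [PySem.List.pyGet?_natCast, PySem.List.pyGet?_natCast, ihr]
        rfl
    rw [hrest, ih, List.mapM_cons]; rfl

lemma pv_foldlM_eq (s : List Char) : ∀ (cnt : List Int),
    s.foldlM (fun cnt c => (PySem.Int.ofChars? [c]).map (pvBump cnt)) cnt
    = (s.mapM (fun c => PySem.Int.ofChars? [c])).map (fun ds => ds.foldl pvBump cnt) := by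
  induction s with
  | nil => intro cnt; simp
  | cons a t ih =>
    intro cnt
    rw [List.foldlM_cons, List.mapM_cons]
    cases h : PySem.Int.ofChars? [a] with
    | none => simp
    | some d =>
      cases ht : t.mapM (fun c => PySem.Int.ofChars? [c]) with
      | none =>
        have h2 := ih (pvBump cnt d); rw [ht] at h2
        simp [h2]
      | some ds =>
        have h2 := ih (pvBump cnt d); rw [ht] at h2
        simp [h2, List.foldl_cons]

lemma pv_foldl_bump_count : ∀ (ds : List Int) (cnt : List Int),
    (∀ d ∈ ds, 0 ≤ d ∧ d < 10) → cnt.length = 10 →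
    ∀ k : Nat, k < 10 →
      (ds.foldl pvBump cnt).getD k 0 = cnt.getD k 0 + (ds.count (k : Int) : Int) := by
  intro ds
  induction ds with
  | nil => intro cnt _ _ k _; simp
  | cons d t ih =>
    intro cnt hb hlen k hk
    have hd := hb d (by simp)
    rw [List.foldl_cons]
    have hlen' : (pvBump cnt d).length = 10 := by simp [pvBump, hlen]
    rw [ih (pvBump cnt d) (fun x hx => hb x (by simp [hx])) hlen' k hk]
    have hget : (pvBump cnt d).getD k 0 = if d.toNat = k then cnt.getD k 0 + 1 else cnt.getD k 0 := by
      unfold pvBump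
      rw [PySem.List.pyGetD_of_nonneg cnt 0 hd.1]
      have hlt : d.toNat < cnt.length := by omega
      rw [List.getD_eq_getElem?_getD, List.getElem?_set]
      by_cases hdk : d.toNat = k
      · rw [if_pos hdk, if_pos hlt, Option.getD_some, ← hdk,
          List.getD_eq_getElem?_getD, List.getElem?_eq_getElem hlt, Option.getD_some, if_pos rfl]
      · rw [if_neg hdk, ← List.getD_eq_getElem?_getD, if_neg hdk]
    rw [hget, List.count_cons]
    by_cases hdk : d.toNat = k
    · have : d = (k : Int) := by omega
      simp [this]
      omega
    · have : ¬ (d = (k : Int)) := by omega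
      simp [this]
      omega

def pvDig (d : Int) : Char := Nat.digitChar d.toNat

lemma pv_toChars_single (d : Int) (h0 : 0 ≤ d) (h9 : d < 10) :
    PySem.Int.toChars d = [pvDig d] := by
  interval_cases d <;> decide

def pvEmit (ds : List Int) : List Int :=
  (([0,1,2,3,4,5,6,7,8,9] : List Int).map (fun k => List.replicate (ds.count k) k)).flatten

lemma pv_sorted_eq_emit (ds : List Int) (hb : ∀ d ∈ ds, 0 ≤ d ∧ d < 10) :
    PySem.List.sorted ds (fun x => x) = pvEmit ds := by
  apply PySem.List.sorted_id_eq_of_perm_of_pairwise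
  · rw [List.perm_iff_count]
    intro x
    unfold pvEmit
    simp only [List.map_cons, List.map_nil, List.flatten_cons, List.flatten_nil,
      List.count_append, List.count_replicate, List.count_nil]
    by_cases hx : x ∈ ds
    · have hxb := hb x hx
      have : x = 0 ∨ x = 1 ∨ x = 2 ∨ x = 3 ∨ x = 4 ∨ x = 5 ∨ x = 6 ∨ x = 7 ∨ x = 8 ∨ x = 9 := by
        omega
      rcases this with rfl|rfl|rfl|rfl|rfl|rfl|rfl|rfl|rfl|rfl <;> norm_num
    · have h0 : ds.count x = 0 := List.count_eq_zero_of_not_mem hx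
      have e : ∀ k : Int, (if (k == x) = true then List.count k ds else 0) = 0 := by
        intro k; split_ifs with hk
        · have hkx : k = x := by simpa using hk
          rw [hkx, h0]
        · rfl
      simp only [e, h0, Nat.add_zero]
  · unfold pvEmit
    simp only [List.map_cons, List.map_nil, List.flatten_cons, List.flatten_nil]
    simp only [List.pairwise_append, List.pairwise_replicate, List.mem_replicate, List.mem_append,
      List.not_mem_nil, List.Pairwise.nil]
    norm_num
    repeat' apply And.intro
    all_goals intro _ b hb'
    all_goals omega

lemma pv_join_map_toChars (l : List Int) (hb : ∀ d ∈ l, 0 ≤ d ∧ d < 10) :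
    PySem.Chars.join [] (l.map PySem.Int.toChars) = l.map pvDig := by
  have hmap : l.map PySem.Int.toChars = (l.map pvDig).map (fun c => [c]) := by
    rw [List.map_map]
    apply List.map_congr_left
    intro d hd
    exact pv_toChars_single d (hb d hd).1 (hb d hd).2
  rw [hmap, PySem.Chars.join_nil_singletons]

lemma pv_emit_bounds (ds : List Int) : ∀ d ∈ pvEmit ds, 0 ≤ d ∧ d < 10 := by
  intro d hd
  unfold pvEmit at hd
  simp only [List.mem_flatten, List.mem_map] at hd
  obtain ⟨l, ⟨k, hk, rfl⟩, hdl⟩ := hd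
  have := List.eq_of_mem_replicate hdl
  subst this
  fin_cases hk <;> norm_num

lemma pv_main (n : Int) (hn : 0 ≤ n) : calc_py n = calc_py_alt n := by
  simp only [calc_py, calc_py_alt]
  rw [pv_mapM_range, pv_foldlM_eq]
  cases h : (PySem.Int.toChars n).mapM (fun c => PySem.Int.ofChars? [c]) with
  | none => rfl
  | some ds =>
    simp only [Option.map_some]
    have hb : ∀ d ∈ ds, 0 ≤ d ∧ d < 10 := pv_mapM_bounds _ ds (pv_toChars_digits n hn) h
    have hrep : PySem.List.pyRepeat [(0:Int)] 10 = List.replicate 10 (0:Int) := by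
      rw [PySem.List.pyRepeat_singleton]; rfl
    rw [hrep]
    set cnt := ds.foldl pvBump (List.replicate 10 (0:Int)) with hcntdef
    have hlen : (List.replicate 10 (0:Int)).length = 10 := by simp
    have hcnt : ∀ k : Nat, k < 10 → cnt.getD k 0 = (ds.count (k:Int) : Int) := by
      intro k hk
      rw [hcntdef, pv_foldl_bump_count ds _ hb hlen k hk]
      interval_cases k <;> norm_num [List.getD_eq_getElem?_getD]
    have hasc : PySem.Chars.join []
        ((PySem.List.pyRange 0 10).map
          (fun d => PySem.List.pyRepeat (PySem.Int.toChars d) (PySem.List.pyGetD cnt d 0)))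
        = (pvEmit ds).map pvDig := by
      have hr10 : PySem.List.pyRange 0 10 = [0,1,2,3,4,5,6,7,8,9] := by decide
      rw [hr10]
      have e : ∀ d : Int, 0 ≤ d → d < 10 →
          PySem.List.pyRepeat (PySem.Int.toChars d) (PySem.List.pyGetD cnt d 0)
          = List.replicate (ds.count d) (pvDig d) := by
        intro d h0 h9
        have h1 : cnt.getD d.toNat 0 = (ds.count d : Int) := by
          rw [hcnt d.toNat (by omega), Int.toNat_of_nonneg h0]
        rw [pv_toChars_single d h0 h9, PySem.List.pyRepeat_singleton,
          PySem.List.pyGetD_of_nonneg cnt 0 h0, h1, Int.toNat_natCast]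
      simp only [List.map_cons, List.map_nil]
      rw [e 0 (by norm_num) (by norm_num), e 1 (by norm_num) (by norm_num),
        e 2 (by norm_num) (by norm_num), e 3 (by norm_num) (by norm_num),
        e 4 (by norm_num) (by norm_num), e 5 (by norm_num) (by norm_num),
        e 6 (by norm_num) (by norm_num), e 7 (by norm_num) (by norm_num),
        e 8 (by norm_num) (by norm_num), e 9 (by norm_num) (by norm_num)]
      rw [pv_join_nil_flatten]
      unfold pvEmit
      simp only [List.map_cons, List.map_nil, List.map_flatten, List.map_replicate]
    rw [pv_sorted_eq_emit ds hb, hasc,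
      pv_join_map_toChars (pvEmit ds) (pv_emit_bounds ds),
      PySem.List.slice?_none_none_neg_one, PySem.List.slice?_none_none_neg_one]
    simp only [Option.map_some]
    have hrev : PySem.Chars.join [] ((List.map PySem.Int.toChars (pvEmit ds)).reverse)
        = ((pvEmit ds).map pvDig).reverse := by
      rw [← List.map_reverse, pv_join_map_toChars _ (fun d hd => pv_emit_bounds ds d (List.mem_reverse.mp hd)), List.map_reverse]
    rw [hrev]

-- ===== VERDICT =====
theorem calc_py_spec : Claim_equal_calc_py := by
  intro n _ hpre
  unfold Spec_calc_py
  exact pv_main n hpre
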